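-- pv_equiv track=rewrite | github.com/galalqassas/Research-agents-validation | utils/data_utils.py | merge_schema_data
-- ===== SOURCE A (Python) =====
-- from typing import Dict, Any, List
--
-- def merge_schema_data(data_list: List[Dict[str, Any]], key_field: str = "Country") -> Dict[str, List[Dict[str, Any]]]:
--     grouped = {}
--     for data in data_list:
--         key = data.get(key_field, "unknown")
--         if key not in grouped:
--             grouped[key] = []
--         grouped[key].append(data)
--     return grouped
-- ===== SOURCE B (Python) =====
-- def merge_schema_data(data_list, key_field="Country"):
--     keys = []
--     for data in data_list:
--         k = data.get(key_field, "unknown")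
--         if k not in keys:
--             keys.append(k)
--     return {k: [d for d in data_list if d.get(key_field, "unknown") == k] for k in keys}
-- ===== Notes on version B (the rewrite author's own statement) =====
-- stated objective: alternative
-- what changed: Replaces the single insert-and-append pass over a growing dict by a two-phase scheme: one pass collecting the distinct keys in first-seen order, then a dict comprehension building each group by filtering the whole list per key.
import Mathlib
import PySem

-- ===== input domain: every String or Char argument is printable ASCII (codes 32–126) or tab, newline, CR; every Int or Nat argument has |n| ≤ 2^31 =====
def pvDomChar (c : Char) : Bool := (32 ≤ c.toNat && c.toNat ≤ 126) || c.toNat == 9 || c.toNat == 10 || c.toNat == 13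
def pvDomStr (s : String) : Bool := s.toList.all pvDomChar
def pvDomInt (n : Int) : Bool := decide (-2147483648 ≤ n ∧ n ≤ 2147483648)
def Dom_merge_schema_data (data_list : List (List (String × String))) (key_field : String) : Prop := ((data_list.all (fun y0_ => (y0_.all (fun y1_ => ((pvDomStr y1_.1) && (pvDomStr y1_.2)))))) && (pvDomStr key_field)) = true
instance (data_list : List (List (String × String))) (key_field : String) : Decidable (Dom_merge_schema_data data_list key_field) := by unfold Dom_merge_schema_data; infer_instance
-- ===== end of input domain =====

-- B replaces A's single insert-and-append pass over a growing dict by two phases: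
-- collect the distinct keys in first-seen order, then build each group by filtering
-- the whole list per key (same result, genuinely different traversal; no speed claim).


-- ===== PORT A =====
def merge_schema_data (data_list : List (List (String × String))) (key_field : String) : List (String × List (List (String × String))) :=
  (data_list.foldl
    (fun grouped data =>
      let key := (PySem.Dict.mk data).getD key_field "unknown"
      let grouped := if grouped.contains key then grouped else grouped.insert key ([] : List (List (String × String)))
      grouped.modify key [] (fun l => l ++ [data]))
    PySem.Dict.empty).items

-- ===== PORT B =====
def merge_schema_data_alt (data_list : List (List (String × String))) (key_field : String) : List (String × List (List (String × String))) :=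
  let keys : PySem.Set String :=
    data_list.foldl (fun ks data => PySem.Set.add ks ((PySem.Dict.mk data).getD key_field "unknown")) PySem.Set.empty
  keys.map (fun k => (k, data_list.filter (fun d => (PySem.Dict.mk d).getD key_field "unknown" == k)))

-- ===== PRECONDITION & SPEC =====
def Spec_merge_schema_data (data_list : List (List (String × String))) (key_field : String) (out : List (String × List (List (String × String)))) : Prop := out = merge_schema_data_alt data_list key_field
instance (data_list : List (List (String × String))) (key_field : String) (out : List (String × List (List (String × String)))) : Decidable (Spec_merge_schema_data data_list key_field out) := by unfold Spec_merge_schema_data; infer_instance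

-- ===== CLAIM (what is proved, stated in full; the proofs are below) =====
def Claim_equal_merge_schema_data : Prop := ∀ (data_list : List (List (String × String))) (key_field : String), Dom_merge_schema_data data_list key_field → Spec_merge_schema_data data_list key_field (merge_schema_data data_list key_field)

-- ===== LEMMAS AND PROOFS =====

-- A dict whose keys are Nodup keeps Nodup keys through a modify.
theorem pv_nodup_modify {ν : Type} (d : PySem.Dict String ν) (k : String) (d0 : ν) (f : ν → ν)
    (hnd : d.keys.Nodup) : (d.modify k d0 f).keys.Nodup := by
  rw [PySem.Dict.keys_modify]
  exact PySem.Dict.nodup_keys_insert d k _ hnd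

-- A's "if key not in grouped: grouped[key] = []" followed by the append is one modify.
theorem pv_body_eq (d : PySem.Dict String (List (List (String × String)))) (k : String)
    (x : List (String × String)) (hnd : d.keys.Nodup) :
    ((if d.contains k then d else d.insert k ([] : List (List (String × String)))).modify k []
      (fun l => l ++ [x])) = d.modify k [] (fun l => l ++ [x]) := by
  by_cases h : d.contains k = true
  · simp [h]
  · rw [Bool.not_eq_true] at h
    rw [if_neg (by simp [h])]
    have hknot : k ∉ d.keys := by
      intro hm
      have hc := (PySem.Dict.contains_iff_mem_keys d k).mpr hm
      rw [h] at hc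
      exact Bool.false_ne_true hc
    have hkeysL : ((d.insert k ([] : List (List (String × String)))).modify k []
        (fun l => l ++ [x])).keys = d.keys ++ [k] := by
      rw [PySem.Dict.keys_modify, PySem.Dict.insert_insert_self,
        PySem.Dict.keys_insert_of_not_contains d _ h]
    have hkeysR : (d.modify k [] (fun l => l ++ [x])).keys = d.keys ++ [k] := by
      rw [PySem.Dict.keys_modify, PySem.Dict.keys_insert_of_not_contains d _ h]
    have hndA : (d.keys ++ [k]).Nodup := by
      refine List.Nodup.append hnd (List.nodup_singleton k) ?_
      simpa [List.disjoint_singleton] using hknot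
    apply PySem.Dict.ext
    rw [PySem.Dict.items_eq_map_keys _ (by rw [hkeysL]; exact hndA) ([] : List (List (String × String))),
        PySem.Dict.items_eq_map_keys _ (by rw [hkeysR]; exact hndA) ([] : List (List (String × String))),
        hkeysL, hkeysR]
    apply List.map_congr_left
    intro k' _
    rw [PySem.Dict.getD_modify, PySem.Dict.getD_modify]
    by_cases hk : k' = k
    · rw [if_pos hk, if_pos hk, PySem.Dict.getD_insert, if_pos rfl,
        PySem.Dict.getD_of_not_contains d _ h]
    · rw [if_neg hk, if_neg hk, PySem.Dict.getD_insert_of_ne d _ _ hk]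

-- A's whole loop equals a plain modify-append fold, for any Nodup-keyed start.
theorem pv_fold_eq (key_field : String) (l : List (List (String × String))) :
    ∀ (d : PySem.Dict String (List (List (String × String)))), d.keys.Nodup →
    l.foldl
      (fun grouped data =>
        let key := (PySem.Dict.mk data).getD key_field "unknown"
        let grouped := if grouped.contains key then grouped else grouped.insert key ([] : List (List (String × String)))
        grouped.modify key [] (fun l => l ++ [data])) d
    = l.foldl (fun d x => d.modify ((PySem.Dict.mk x).getD key_field "unknown") [] (fun l => l ++ [x])) d := by
  induction l with
  | nil => intro d _; rfl
  | cons x xs ih =>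
    intro d hnd
    rw [List.foldl_cons, List.foldl_cons]
    have hb := pv_body_eq d ((PySem.Dict.mk x).getD key_field "unknown") x hnd
    show xs.foldl _ ((if d.contains ((PySem.Dict.mk x).getD key_field "unknown") then d
        else d.insert ((PySem.Dict.mk x).getD key_field "unknown") []).modify
        ((PySem.Dict.mk x).getD key_field "unknown") [] (fun l => l ++ [x])) = _
    rw [hb]
    exact ih _ (pv_nodup_modify d _ _ _ hnd)

theorem merge_schema_data_spec : Claim_equal_merge_schema_data := by
  intro data_list key_field _
  unfold Spec_merge_schema_data merge_schema_data merge_schema_data_alt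
  rw [pv_fold_eq key_field data_list PySem.Dict.empty (by rw [PySem.Dict.keys_empty]; exact List.nodup_nil)]
  set D := data_list.foldl
    (fun d x => d.modify ((PySem.Dict.mk x).getD key_field "unknown") [] (fun l => l ++ [x]))
    PySem.Dict.empty with hD
  have hnodup : D.keys.Nodup := by
    rw [hD]
    exact PySem.Dict.nodup_keys_foldl_modify_key data_list
      (fun x => (PySem.Dict.mk x).getD key_field "unknown") [] (fun _ x l => l ++ [x])
      PySem.Dict.empty (by rw [PySem.Dict.keys_empty]; exact List.nodup_nil)
  have hkeys : D.keys = PySem.Set.ofList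
      (data_list.map (fun x => (PySem.Dict.mk x).getD key_field "unknown")) := by
    rw [hD, PySem.Dict.keys_foldl_modify_key data_list
      (fun x => (PySem.Dict.mk x).getD key_field "unknown") [] (fun _ x l => l ++ [x])
      PySem.Dict.empty, PySem.Dict.keys_empty]
    exact PySem.Set.update_nil_left _
  have hgetD : ∀ c, D.getD c [] =
      data_list.filter (fun x => (PySem.Dict.mk x).getD key_field "unknown" == c) := by
    intro c
    have h := PySem.Dict.getD_foldl_modify_append
      (data_list.map (fun x => ((PySem.Dict.mk x).getD key_field "unknown", x)))
      (PySem.Dict.empty : PySem.Dict String (List (List (String × String)))) c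
    rw [List.foldl_map] at h
    rw [hD]
    simp only [h, PySem.Dict.getD_empty, List.nil_append, List.filter_map, List.map_map]
    simp [Function.comp_def]
  have hB : data_list.foldl
      (fun ks data => PySem.Set.add ks ((PySem.Dict.mk data).getD key_field "unknown"))
      PySem.Set.empty
      = PySem.Set.ofList (data_list.map (fun x => (PySem.Dict.mk x).getD key_field "unknown")) := by
    rw [← PySem.Set.update_map_eq_foldl_add data_list
      (fun x => (PySem.Dict.mk x).getD key_field "unknown") PySem.Set.empty]
    exact PySem.Set.update_nil_left _
  rw [hB, PySem.Dict.items_eq_map_keys D hnodup ([] : List (List (String × String))), hkeys]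
  apply List.map_congr_left
  intro k _
  rw [hgetD k]
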